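-- pv_equiv track=rewrite | github.com/herberthamaral/arbety-crawler | kelly_criterion.py | get_max_streak
-- ===== SOURCE A (Python) =====
-- def get_max_streak(db_slice):
--     maxes = {"red": 0, "black": 0, "white": 0}
--     currents = {"red": 0, "black": 0, "white": 0}
--     current = ''
--     for s in db_slice:
--         if current != s:
--             currents[s] = 0
--         currents[s] += 1
--         maxes[s] = max(maxes[s], currents[s])
--         current = s
--     return maxes
-- ===== SOURCE B (Python) =====
-- def get_max_streak(db_slice):
--     maxes = {"red": 0, "black": 0, "white": 0}
--     i, n = 0, len(db_slice)
--     while i < n: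
--         color = db_slice[i]
--         j = i + 1
--         while j < n and db_slice[j] == color:
--             j += 1
--         maxes[color] = max(maxes[color], j - i)
--         i = j
--     return maxes
-- ===== Notes on version B (the rewrite author's own statement) =====
-- stated objective: alternative
-- what changed: B iterates over maximal runs of equal colors (an index scan finds each run's end and does one max-update per run) instead of A's per-element pass that maintains a per-color running-count dict with a reset flag.
import Mathlib
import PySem

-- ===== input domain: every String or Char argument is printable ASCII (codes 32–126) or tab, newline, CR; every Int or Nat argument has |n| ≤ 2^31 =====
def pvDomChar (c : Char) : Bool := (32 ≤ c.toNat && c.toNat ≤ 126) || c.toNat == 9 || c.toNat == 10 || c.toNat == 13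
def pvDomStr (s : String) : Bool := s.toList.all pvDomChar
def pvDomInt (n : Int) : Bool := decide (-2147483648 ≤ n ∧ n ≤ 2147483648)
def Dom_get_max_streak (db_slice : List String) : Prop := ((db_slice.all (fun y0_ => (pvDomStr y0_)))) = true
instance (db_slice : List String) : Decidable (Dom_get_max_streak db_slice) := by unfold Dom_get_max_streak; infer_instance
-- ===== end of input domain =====

-- B replaces A's per-element pass (per-color running-count dict + reset flag) by a run-based
-- scan: one max-update per maximal run of equal colors. Alternative decomposition, same cost.


-- ===== PORT A =====
-- the initial {"red": 0, "black": 0, "white": 0} dict of both programs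
def gmsInit : PySem.Dict String Int :=
  PySem.Dict.ofList [("red", 0), ("black", 0), ("white", 0)]

-- A's for-loop, state (maxes, currents, current).  The reads maxes[s] / currents[s] are ported
-- as getD _ 0: exact under Pre_ (s is always one of the three pre-seeded keys; in Python a
-- missing key raises KeyError, which Pre_ excludes).
def gmsLoopA : List String → PySem.Dict String Int → PySem.Dict String Int → String → PySem.Dict String Int
  | [], maxes, _, _ => maxes
  | s :: rest, maxes, currents, current =>
    let c1 := if current ≠ s then currents.insert s 0 else currents
    let c2 := c1.insert s (c1.getD s 0 + 1)
    let m2 := maxes.insert s (max (maxes.getD s 0) (c2.getD s 0))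
    gmsLoopA rest m2 c2 s

def get_max_streak (db_slice : List String) : List (String × Int) :=
  (gmsLoopA db_slice gmsInit gmsInit "").items

-- ===== PORT B =====
-- B's outer while-loop: take the maximal run at the front (the inner 'while j < n and
-- db_slice[j] == color' forward scan is transcribed as takeWhile/dropWhile on the tail),
-- do one max-update for it, continue after the run.  maxes[color] read ported as getD _ 0
-- (exact under Pre_, as above).
def gmsRunB : List String → PySem.Dict String Int → PySem.Dict String Int
  | [], maxes => maxes
  | color :: rest, maxes =>
    gmsRunB (rest.dropWhile (· == color))
      (maxes.insert color (max (maxes.getD color 0) (1 + (rest.takeWhile (· == color)).length)))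
  termination_by xs _ => xs.length
  decreasing_by
    have := List.length_dropWhile_le (· == color) rest
    simp; omega

def get_max_streak_alt (db_slice : List String) : List (String × Int) :=
  (gmsRunB db_slice gmsInit).items

-- ===== PRECONDITION & SPEC =====
-- Pre_ = exactly the inputs where Python A returns: any element outside the three pre-seeded
-- keys makes 'maxes[s]' raise KeyError.
def Pre_get_max_streak (db_slice : List String) : Prop :=
  ∀ s ∈ db_slice, s = "red" ∨ s = "black" ∨ s = "white"
instance (db_slice : List String) : Decidable (Pre_get_max_streak db_slice) := by
  unfold Pre_get_max_streak; infer_instance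

def pvWitness_get_max_streak : List String := ["red", "red", "black", "red", "white"]

def Spec_get_max_streak (db_slice : List String) (out : List (String × Int)) : Prop := out = get_max_streak_alt db_slice
instance (db_slice : List String) (out : List (String × Int)) : Decidable (Spec_get_max_streak db_slice out) := by unfold Spec_get_max_streak; infer_instance

-- ===== CLAIM (what is proved, stated in full; the proofs are below) =====
def Claim_equal_get_max_streak : Prop := ∀ (db_slice : List String), Dom_get_max_streak db_slice → Pre_get_max_streak db_slice → Spec_get_max_streak db_slice (get_max_streak db_slice)

-- ===== LEMMAS AND PROOFS =====

-- Processing a run of k+1 copies of s from a state whose current color is s with current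
-- count j collapses to a single max-update (and a single count-insert).
theorem gmsLoopA_replicate (k : Nat) :
    ∀ (tail : List String) (M C : PySem.Dict String Int) (s : String) (j : Int),
      C.getD s 0 = j →
      gmsLoopA (List.replicate (k + 1) s ++ tail) M C s
        = gmsLoopA tail (M.insert s (max (M.getD s 0) (j + k + 1))) (C.insert s (j + k + 1)) s := by
  induction k with
  | zero =>
    intro tail M C s j hj
    simp [gmsLoopA, hj]
  | succ k ih =>
    intro tail M C s j hj
    rw [show List.replicate (k + 1 + 1) s = s :: List.replicate (k + 1) s from rfl]
    simp only [gmsLoopA, List.cons_append, ne_eq, not_true_eq_false, if_false, hj,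
      PySem.Dict.getD_insert_self]
    rw [ih tail _ _ s (j + 1) (PySem.Dict.getD_insert_self _ _ _ _)]
    rw [PySem.Dict.insert_insert_self, PySem.Dict.insert_insert_self,
      PySem.Dict.getD_insert_self]
    have h1 : max (max (M.getD s 0) (j + 1)) (j + 1 + ↑k + 1) = max (M.getD s 0) (j + (↑k + 1) + 1) := by
      omega
    have h2 : (j + 1 + (k : Int) + 1) = j + ((k : Int) + 1) + 1 := by ring
    rw [h1, h2]
    push_cast
    ring_nf

-- A's loop equals B's run loop whenever the incoming current-count of the incoming current
-- color is 0 if that color heads the list (true initially and at every run boundary).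
theorem gmsLoopA_eq_gmsRunB (n : Nat) :
    ∀ (xs : List String), xs.length ≤ n →
      ∀ (M C : PySem.Dict String Int) (cur : String),
        (xs.head? = some cur → C.getD cur 0 = 0) →
        gmsLoopA xs M C cur = gmsRunB xs M := by
  induction n with
  | zero =>
    intro xs hlen M C cur _
    have : xs = [] := List.length_eq_zero_iff.mp (Nat.le_zero.mp hlen)
    subst this; simp [gmsLoopA, gmsRunB]
  | succ n ih =>
    intro xs hlen M C cur hcur
    match xs with
    | [] => simp [gmsLoopA, gmsRunB]
    | s :: rest =>
      -- one step of A's loop, with the two if-branches collapsing to the same state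
      have hstep : gmsLoopA (s :: rest) M C cur
          = gmsLoopA rest (M.insert s (max (M.getD s 0) 1)) (C.insert s 1) s := by
        by_cases h : cur = s
        · subst h
          have h0 : C.getD cur 0 = 0 := hcur rfl
          simp [gmsLoopA, h0, PySem.Dict.getD_insert_self]
        · simp [gmsLoopA, h, PySem.Dict.getD_insert_self, PySem.Dict.insert_insert_self]
      rw [hstep]
      have hsplit : rest = rest.takeWhile (· == s) ++ rest.dropWhile (· == s) :=
        (List.takeWhile_append_dropWhile).symm
      have hrep : rest.takeWhile (· == s) = List.replicate (rest.takeWhile (· == s)).length s := by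
        apply List.eq_replicate_of_mem
        intro b hb
        have hp : (b == s) = true := List.mem_takeWhile_imp (p := fun x => x == s) hb
        exact eq_of_beq hp
      have htail : ∀ {t}, (rest.dropWhile (· == s)).head? = some t → t ≠ s := by
        intro t ht hts
        have := List.head?_dropWhile_not (· == s) rest
        rw [ht] at this
        simp [hts] at this
      have htaillen : (rest.dropWhile (· == s)).length ≤ rest.length :=
        List.length_dropWhile_le _ _
      have hlen' : rest.length ≤ n := by simpa using Nat.succ_le_succ_iff.mp hlen
      -- B's step
      have hB : gmsRunB (s :: rest) M
          = gmsRunB (rest.dropWhile (· == s))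
              (M.insert s (max (M.getD s 0) (1 + ((rest.takeWhile (· == s)).length : Int)))) := by
        simp [gmsRunB]
      rw [hB]
      rcases k0 : (rest.takeWhile (· == s)).length with _ | k'
      · -- empty run continuation: rest starts with a different color (or is empty)
        have hTW0 : rest.takeWhile (· == s) = [] := List.length_eq_zero_iff.mp k0
        have hrest : rest = rest.dropWhile (· == s) := by
          conv_lhs => rw [hsplit, hTW0]
          simp
        have hcond : rest.head? = some s → (C.insert s 1).getD s 0 = 0 := by
          intro h; exact absurd rfl (htail (hrest ▸ h))
        rw [ih rest hlen' _ _ s (by rw [hrest] at hcond ⊢; exact hcond)]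
        rw [← hrest]
        norm_num
      · -- a run of k' further copies of s follows
        have hrest : rest = List.replicate (k' + 1) s ++ rest.dropWhile (· == s) := by
          conv_lhs => rw [hsplit]
          rw [hrep, k0]
        conv_lhs => rw [hrest]
        rw [gmsLoopA_replicate k' _ _ _ s 1 (PySem.Dict.getD_insert_self _ _ _ _)]
        rw [PySem.Dict.insert_insert_self, PySem.Dict.insert_insert_self,
          PySem.Dict.getD_insert_self]
        have htl2 : (rest.dropWhile (· == s)).length ≤ n := le_trans htaillen hlen'
        have hcond2 : (rest.dropWhile (· == s)).head? = some s →
            (C.insert s (1 + (k' : Int) + 1)).getD s 0 = 0 := by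
          intro h; exact absurd rfl (htail h)
        rw [ih _ htl2 _ _ s hcond2]
        have hmm : max (max (M.getD s 0) 1) (1 + (k' : Int) + 1)
            = max (M.getD s 0) (1 + ((k' : Int) + 1)) := by omega
        rw [hmm]
        push_cast
        ring_nf

-- ===== VERDICT (by name: the statement is the Claim_ definition above) =====
theorem get_max_streak_spec : Claim_equal_get_max_streak := by
  intro db_slice _ _
  unfold Spec_get_max_streak get_max_streak get_max_streak_alt
  rw [gmsLoopA_eq_gmsRunB db_slice.length db_slice le_rfl gmsInit gmsInit ""
    (by intro h; decide)]
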